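-- pv_equiv track=rewrite | github.com/Awerroes569/codewars | Python/validate_battlefield.py | detect_ship
-- ===== SOURCE A (Python) =====
-- def detect_ship(field,size):
--     result=[]
--     for y in range(len(field)):
--         for x in range(len(field[0])-size+1):
--             if sum(field[y][x:x+size])==size:
--                 result.append((size,y,x,True))
--     if size>1:
--         newfield=[list(x) for x in zip(*field)]
--         for y in range(len(field[0])):
--             for x in range(len(field)-size+1):
--                 if sum(newfield[y][x:x+size])==size:
--                     result.append((size,x,y,False))
--     return result
-- ===== SOURCE B (Python) =====
-- def _run_starts(line, width, size):
--     # start positions x in [0, width-size] where the `size` cells from x sum to `size`,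
--     # maintained as a sliding running sum
--     n = width - size + 1
--     if n <= 0:
--         return []
--     s = sum(line[:size])
--     hits = [0] if s == size else []
--     for x in range(1, n):
--         s += line[x + size - 1] - line[x - 1]
--         if s == size:
--             hits.append(x)
--     return hits
--
-- def detect_ship(field, size):
--     result = []
--     for y in range(len(field)):
--         for x in _run_starts(field[y], len(field[0]), size):
--             result.append((size, y, x, True))
--     if size > 1:
--         for x in range(len(field[0])):
--             col = [row[x] for row in field]
--             for y in _run_starts(col, len(field), size):
--                 result.append((size, y, x, False))
--     return result
-- ===== Notes on version B (the rewrite author's own statement) =====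
-- stated objective: alternative
-- what changed: Replaces A's per-window slice re-summation (sum(field[y][x:x+size]) at every position, plus a full zip-transpose) by a sliding running window sum per row/column updated in O(1) per step; Pre_ restricts to the natural battleship domain (a board with every row at least as wide as the first, nonnegative size, or an empty board with size <= 1): outside it A still returns values shaped by Python's silent slice/zip truncation or negative-slice wraparound, where B's direct indexing raises instead.
-- outside the precondition, e.g. on detect_ship([[1, -1], [0, 1]], -1): A returns [], B raises IndexError
import Mathlib
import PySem

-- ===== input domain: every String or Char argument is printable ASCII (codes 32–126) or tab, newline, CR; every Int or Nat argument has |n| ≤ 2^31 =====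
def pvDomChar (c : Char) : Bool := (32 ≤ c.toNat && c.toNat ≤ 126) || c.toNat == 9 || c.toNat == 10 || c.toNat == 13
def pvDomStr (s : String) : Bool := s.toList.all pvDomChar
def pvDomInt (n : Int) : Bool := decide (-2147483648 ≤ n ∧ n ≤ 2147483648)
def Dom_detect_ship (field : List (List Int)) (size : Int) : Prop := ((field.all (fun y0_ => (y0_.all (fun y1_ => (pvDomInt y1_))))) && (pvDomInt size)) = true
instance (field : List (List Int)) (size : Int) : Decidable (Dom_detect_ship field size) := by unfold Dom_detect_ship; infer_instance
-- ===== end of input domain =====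

-- B slides a running window sum along each row and each column (O(1) per position)
-- instead of A's re-summing a slice at every position and zip-transposing the grid.

-- ===== PORT A =====
-- zip(*field): columns up to the shortest row, exact transliteration of Python's zip over the rows
def pyZipStar (field : List (List Int)) : List (List Int) :=
  match field with
  | [] => []
  | f :: rest =>
    (List.range (rest.foldl (fun m r => min m r.length) f.length)).map
      (fun j => field.map (fun r => r.getD j 0))

def detect_ship (field : List (List Int)) (size : Int) : List (Int × Int × Int × Bool) :=
  let result := (PySem.List.pyRange 0 (field.length : Int) 1).foldl (fun acc y =>
    (PySem.List.pyRange 0 (((field.headD []).length : Int) - size + 1) 1).foldl (fun acc x =>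
      if (PySem.List.slice (PySem.List.pyGetD field y []) (some x) (some (x + size))).sum = size
      then acc ++ [(size, y, x, true)] else acc) acc) []
  if size > 1 then
    let newfield := pyZipStar field
    (PySem.List.pyRange 0 (((field.headD []).length : Int)) 1).foldl (fun acc y =>
      (PySem.List.pyRange 0 ((field.length : Int) - size + 1) 1).foldl (fun acc x =>
        if (PySem.List.slice (PySem.List.pyGetD newfield y []) (some x) (some (x + size))).sum = size
        then acc ++ [(size, x, y, false)] else acc) acc) result
  else result

-- ===== PORT B =====
-- start positions x in [0, width-size] where the `size` cells from x sum to `size`, by a sliding running sum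
def runStarts (line : List Int) (width size : Int) : List Int :=
  let n : Int := width - size + 1
  if n ≤ 0 then []
  else
    let s0 := (PySem.List.slice line none (some size)).sum
    let hits0 := if s0 = size then [(0 : Int)] else []
    ((PySem.List.pyRange 1 n 1).foldl (fun (p : Int × List Int) x =>
        let s := p.1 + PySem.List.pyGetD line (x + size - 1) 0 - PySem.List.pyGetD line (x - 1) 0
        (s, if s = size then p.2 ++ [x] else p.2)) (s0, hits0)).2

def detect_ship_alt (field : List (List Int)) (size : Int) : List (Int × Int × Int × Bool) :=
  let result := (PySem.List.pyRange 0 (field.length : Int) 1).foldl (fun acc y =>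
    (runStarts (PySem.List.pyGetD field y []) (((field.headD []).length : Int)) size).foldl
      (fun acc x => acc ++ [(size, y, x, true)]) acc) []
  if size > 1 then
    (PySem.List.pyRange 0 (((field.headD []).length : Int)) 1).foldl (fun acc x =>
      (runStarts (field.map (fun row => PySem.List.pyGetD row x 0)) ((field.length : Int)) size).foldl
        (fun acc y => acc ++ [(size, y, x, false)]) acc) result
  else result

-- ===== PRECONDITION & SPEC =====
-- Pre_ restricts to the natural battleship domain: a board whose rows all reach the board width
-- len(field[0]) and a nonnegative ship size (or an empty board with size ≤ 1, where both return []).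
-- Outside it A does RETURN values — rows shorter than the first are silently truncated by slicing and
-- by zip(*field), and a negative size turns x+size into a negative slice bound that wraps around —
-- but those values are accidents of Python slicing, not grid semantics, and B (which indexes rows and
-- columns directly) raises IndexError there instead of reproducing them; see the cites.
def Pre_detect_ship (field : List (List Int)) (size : Int) : Prop :=
  (field = [] ∧ size ≤ 1) ∨
    (field ≠ [] ∧ 0 ≤ size ∧ ∀ row ∈ field, (field.headD []).length ≤ row.length)
instance (field : List (List Int)) (size : Int) : Decidable (Pre_detect_ship field size) := by
  unfold Pre_detect_ship; infer_instance

def pvWitness_detect_ship : List (List Int) × Int := ([[1, 1, 0], [0, 1, 0], [0, 1, 0]], 2)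

def Spec_detect_ship (field : List (List Int)) (size : Int) (out : List (Int × Int × Int × Bool)) : Prop := out = detect_ship_alt field size
instance (field : List (List Int)) (size : Int) (out : List (Int × Int × Int × Bool)) : Decidable (Spec_detect_ship field size out) := by unfold Spec_detect_ship; infer_instance

-- ===== CLAIM (what is proved, stated in full; the proofs are below) =====
def Claim_equal_detect_ship : Prop := ∀ (field : List (List Int)) (size : Int), Dom_detect_ship field size → Pre_detect_ship field size → Spec_detect_ship field size (detect_ship field size)

-- ===== LEMMAS AND PROOFS =====

-- sum of a contiguous chunk as a difference of two prefix sums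
lemma sum_drop_take (xs : List Int) (a k : Nat) :
    ((xs.drop a).take k).sum = (xs.take (a + k)).sum - (xs.take a).sum := by
  rw [List.take_add, List.sum_append]; ring

-- the window sum as a prefix-sum difference
lemma wsum_eq (line : List Int) (size x : Int) (hx : 0 ≤ x) (hs : 0 ≤ size) :
    (PySem.List.slice line (some x) (some (x + size))).sum
      = (line.take (x + size).toNat).sum - (line.take x.toNat).sum := by
  rw [PySem.List.slice_toNat line hx (by omega), sum_drop_take,
      show x.toNat + ((x + size).toNat - x.toNat) = (x + size).toNat by omega]

-- one more element in the prefix sum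
lemma P_succ (line : List Int) (i : Int) (h0 : 0 ≤ i) (h : i < (line.length : Int)) :
    (line.take (i + 1).toNat).sum
      = (line.take i.toNat).sum + line.getD i.toNat 0 := by
  have hlt : i.toNat < line.length := by omega
  rw [show (i + 1).toNat = i.toNat + 1 by omega, List.sum_take_succ _ _ hlt,
      List.getD_eq_getElem _ _ hlt]

-- the sliding-sum loop returns its accumulated hits followed by the window positions of the rest
lemma fold_inv (line : List Int) (size n : Int) (hs : 0 ≤ size)
    (hn : n ≤ (line.length : Int) - size + 1) :
    ∀ (k : Nat) (a : Int) (s : Int) (hits : List Int), (n - a).toNat = k → 1 ≤ a →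
      s = (line.take (a - 1 + size).toNat).sum - (line.take (a - 1).toNat).sum →
      ((PySem.List.pyRange a n 1).foldl (fun (p : Int × List Int) x =>
          let s := p.1 + PySem.List.pyGetD line (x + size - 1) 0 - PySem.List.pyGetD line (x - 1) 0
          (s, if s = size then p.2 ++ [x] else p.2)) (s, hits)).2
        = hits ++ (PySem.List.pyRange a n 1).filter
            (fun x => decide ((line.take (x + size).toNat).sum - (line.take x.toNat).sum = size)) := by
  intro k
  induction k with
  | zero =>
    intro a s hits hk ha hsum
    rw [PySem.List.pyRange_one_eq_nil (by omega)]
    simp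
  | succ m ih =>
    intro a s hits hk ha hsum
    have halt : a < n := by omega
    rw [PySem.List.pyRange_one_cons halt, List.foldl_cons, List.filter_cons]
    have hi1 : PySem.List.pyGetD line (a + size - 1) 0 = line.getD (a + size - 1).toNat 0 := by
      rw [PySem.List.pyGetD_eq_getElem _ _ (by omega) (by omega)]
      rw [List.getD_eq_getElem _ _ (by omega)]
    have hi2 : PySem.List.pyGetD line (a - 1) 0 = line.getD (a - 1).toNat 0 := by
      rw [PySem.List.pyGetD_eq_getElem _ _ (by omega) (by omega)]
      rw [List.getD_eq_getElem _ _ (by omega)]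
    have hstep : s + PySem.List.pyGetD line (a + size - 1) 0 - PySem.List.pyGetD line (a - 1) 0
        = (line.take (a + size).toNat).sum - (line.take a.toNat).sum := by
      rw [hi1, hi2, hsum,
          show (a + size).toNat = ((a + size - 1) + 1).toNat by omega,
          show a.toNat = ((a - 1) + 1).toNat by omega,
          P_succ line (a + size - 1) (by omega) (by omega),
          P_succ line (a - 1) (by omega) (by omega),
          show a - 1 + size = a + size - 1 by ring]
      ring
    simp only [hstep]
    by_cases hc : (line.take (a + size).toNat).sum - (line.take a.toNat).sum = size
    · rw [if_pos hc, if_pos (by simpa using hc)]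
      rw [ih (a + 1) _ (hits ++ [a]) (by omega) (by omega)
            (by rw [show a + 1 - 1 + size = a + size by ring, show a + 1 - 1 = a by ring])]
      simp
    · rw [if_neg hc, if_neg (by simpa using hc)]
      exact ih (a + 1) _ hits (by omega) (by omega)
        (by rw [show a + 1 - 1 + size = a + size by ring, show a + 1 - 1 = a by ring])

-- B's helper lists exactly the window positions A's inner loop tests positively
lemma runStarts_eq (line : List Int) (width size : Int) (hs : 0 ≤ size)
    (hw : width ≤ (line.length : Int)) :
    runStarts line width size
      = (PySem.List.pyRange 0 (width - size + 1) 1).filter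
          (fun x => decide ((PySem.List.slice line (some x) (some (x + size))).sum = size)) := by
  unfold runStarts
  set n : Int := width - size + 1 with hn
  have hfilter : (PySem.List.pyRange 0 n 1).filter
        (fun x => decide ((PySem.List.slice line (some x) (some (x + size))).sum = size))
      = (PySem.List.pyRange 0 n 1).filter
        (fun x => decide ((line.take (x + size).toNat).sum - (line.take x.toNat).sum = size)) := by
    apply List.filter_congr
    intro x hx
    rw [PySem.List.mem_pyRange_one] at hx
    rw [wsum_eq line size x hx.1 hs]
  by_cases h0 : n ≤ 0
  · rw [if_pos h0, PySem.List.pyRange_one_eq_nil (by omega)]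
    simp
  · rw [if_neg h0, hfilter]
    have hpos : (0 : Int) < n := by omega
    have hs0 : (PySem.List.slice line none (some size)).sum
        = (line.take (0 + size).toNat).sum - (line.take (0 : Int).toNat).sum := by
      rw [PySem.List.slice_to line hs]
      simp
    rw [fold_inv line size n hs (by omega) (n - 1).toNat 1 _
          (if (PySem.List.slice line none (some size)).sum = size then [(0 : Int)] else [])
          (by omega) (by omega)
          (by rw [hs0]; norm_num)]
    rw [PySem.List.pyRange_one_cons hpos, List.filter_cons]
    by_cases hc : (PySem.List.slice line none (some size)).sum = size
    · rw [if_pos hc, if_pos (by rw [hs0] at hc; simpa using hc)]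
      simp
    · rw [if_neg hc, if_neg (by rw [hs0] at hc; simpa using hc)]
      simp

-- B's hit fold written through A's slice-testing fold
lemma hits_eq {α : Type} (line : List Int) (width size : Int) (hs : 0 ≤ size)
    (hw : width ≤ (line.length : Int)) (g : Int → α) (acc : List α) :
    (runStarts line width size).foldl (fun acc x => acc ++ [g x]) acc
      = (PySem.List.pyRange 0 (width - size + 1) 1).foldl (fun acc x =>
          if (PySem.List.slice line (some x) (some (x + size))).sum = size
          then acc ++ [g x] else acc) acc := by
  rw [PySem.List.foldl_append_singleton_eq_map,
      PySem.List.foldl_append_ite (fun x => (PySem.List.slice line (some x) (some (x + size))).sum = size) g,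
      runStarts_eq line width size hs hw]

-- a foldl of min over row lengths stays at its start value when every row is at least that long
lemma foldl_min_len (l : List (List Int)) : ∀ (i : Nat), (∀ r ∈ l, i ≤ r.length) →
    l.foldl (fun m r => min m r.length) i = i := by
  induction l with
  | nil => intro i _; rfl
  | cons r t ih =>
    intro i h
    have hm : min i r.length = i := min_eq_left (h r (List.mem_cons_self))
    rw [List.foldl_cons, hm]
    exact ih i (fun q hq => h q (List.mem_cons_of_mem _ hq))

-- under Pre_, column y of zip(*field) is the y-th entry of every row
lemma zip_col (field : List (List Int)) (y : Int)
    (hne : field ≠ []) (hrows : ∀ row ∈ field, (field.headD []).length ≤ row.length)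
    (h0 : 0 ≤ y) (hy : y < (((field.headD []).length : Nat) : Int)) :
    PySem.List.pyGetD (pyZipStar field) y [] = field.map (fun r => PySem.List.pyGetD r y 0) := by
  obtain ⟨f, rest, rfl⟩ : ∃ f rest, field = f :: rest := by
    cases field with
    | nil => exact absurd rfl hne
    | cons a b => exact ⟨a, b, rfl⟩
  have hmin : rest.foldl (fun m r => min m r.length) f.length = f.length :=
    foldl_min_len rest f.length (fun r hr => by simpa using hrows r (List.mem_cons_of_mem _ hr))
  have hyf : y.toNat < f.length := by simp at hy; omega
  rw [show pyZipStar (f :: rest)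
        = (List.range (rest.foldl (fun m r => min m r.length) f.length)).map
            (fun j => (f :: rest).map (fun r => r.getD j 0)) from rfl]
  rw [hmin, PySem.List.pyGetD_eq_getElem _ _ h0 (by simp at hy ⊢; omega)]
  simp only [List.getElem_map, List.getElem_range]
  exact (List.map_congr_left (fun r _ => PySem.List.pyGetD_of_nonneg r 0 h0)).symm

-- ===== VERDICT (by name: the statement is the Claim_ definition above) =====
theorem detect_ship_spec : Claim_equal_detect_ship := by
  intro field size hdom hpre
  unfold Spec_detect_ship detect_ship detect_ship_alt
  dsimp only
  rcases hpre with ⟨hfe, hsle⟩ | ⟨hne, hsz, hrows⟩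
  · subst hfe
    rw [if_neg (by omega), if_neg (by omega)]
    simp [PySem.List.pyRange_one_eq_nil]
  · have hres :
        (PySem.List.pyRange 0 (field.length : Int) 1).foldl (fun acc y =>
          (PySem.List.pyRange 0 (((field.headD []).length : Int) - size + 1) 1).foldl (fun acc x =>
            if (PySem.List.slice (PySem.List.pyGetD field y []) (some x) (some (x + size))).sum = size
            then acc ++ [(size, y, x, true)] else acc) acc) ([] : List (Int × Int × Int × Bool))
      = (PySem.List.pyRange 0 (field.length : Int) 1).foldl (fun acc y =>
          (runStarts (PySem.List.pyGetD field y []) (((field.headD []).length : Int)) size).foldl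
            (fun acc x => acc ++ [(size, y, x, true)]) acc) [] := by
      apply PySem.List.foldl_congr_mem
      intro acc y hy
      rw [PySem.List.mem_pyRange_one] at hy
      have hw : (((field.headD []).length : Nat) : Int) ≤ ((PySem.List.pyGetD field y []).length : Int) := by
        rw [PySem.List.pyGetD_eq_getElem _ _ hy.1 (by obtain ⟨h1, h2⟩ := hy; omega)]
        exact_mod_cast hrows _ (List.getElem_mem _)
      rw [hits_eq (PySem.List.pyGetD field y []) _ size hsz hw (fun x => (size, y, x, true)) acc]
    by_cases hgt1 : size > 1
    · rw [if_pos hgt1, if_pos hgt1, hres]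
      apply PySem.List.foldl_congr_mem
      intro acc x hx
      rw [PySem.List.mem_pyRange_one] at hx
      rw [zip_col field x hne hrows hx.1 hx.2]
      rw [hits_eq (field.map fun row => PySem.List.pyGetD row x 0) _ size hsz
            (by rw [List.length_map]) (fun y => (size, y, x, false)) acc]
    · rw [if_neg hgt1, if_neg hgt1]
      exact hres
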